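-- pv_equiv track=rewrite | github.com/MrBrantCode/unitest_baseline | mut_generate/mist_train_cf/cf_88393/solution.py | replace_pattern
-- ===== SOURCE A (Python) =====
-- def replace_pattern(pattern, text):
--     pattern_length = len(pattern)
--     text_length = len(text)
--
--     result = ""
--     i = 0
--
--     while i < text_length:
--         # Check if there is a match for the pattern starting at index i
--         if text[i:i+pattern_length].lower() == pattern.lower():
--             # Replace the pattern with "lessons" while preserving the original case
--             result += "Lessons" if text[i].isupper() else "lessons"
--             i += pattern_length
--         else:
--             # If no match, add the current character to the result and move to the next character
--             result += text[i]
--             i += 1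
--
--     return result
-- ===== SOURCE B (Python) =====
-- def replace_pattern(pattern, text):
--     # Find-and-jump over the lowercased text instead of testing a slice at every index.
--     lp = pattern.lower()
--     lt = text.lower()
--     m = len(pattern)
--     parts = []
--     i = 0
--     while True:
--         j = lt.find(lp, i)
--         if j == -1:
--             parts.append(text[i:])
--             break
--         parts.append(text[i:j])
--         parts.append("Lessons" if text[j].isupper() else "lessons")
--         i = j + m
--     return "".join(parts)
-- ===== Notes on version B (the rewrite author's own statement) =====
-- stated objective: faster
-- what changed: Instead of testing a lowercased slice of length m at every index, B lowercases pattern and text once and uses str.find on the lowercased text to jump directly from match to match, joining collected chunks at the end.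
-- outside the precondition, e.g. on replace_pattern('', ''): A returns '', B raises IndexError
import Mathlib
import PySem

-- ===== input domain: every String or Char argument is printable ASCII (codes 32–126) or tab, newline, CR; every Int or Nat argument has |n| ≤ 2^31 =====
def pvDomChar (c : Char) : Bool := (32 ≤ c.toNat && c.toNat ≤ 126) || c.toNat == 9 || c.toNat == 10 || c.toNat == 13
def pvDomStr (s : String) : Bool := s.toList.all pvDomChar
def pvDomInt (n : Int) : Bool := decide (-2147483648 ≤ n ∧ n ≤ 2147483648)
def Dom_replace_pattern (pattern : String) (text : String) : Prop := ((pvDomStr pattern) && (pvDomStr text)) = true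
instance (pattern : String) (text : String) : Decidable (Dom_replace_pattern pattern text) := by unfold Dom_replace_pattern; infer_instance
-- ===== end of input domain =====

-- B replaces A's per-index lowercased-slice test by a single lowercasing of pattern and
-- text followed by find-and-jump between the matches (objective: faster).

-- ===== PORT A =====
-- A's while loop: result/i are the loop state; the fuel bounds the iteration count
-- (text_length + 1 suffices whenever pattern ≠ "", the precondition; with pattern = ""
-- Python A does not terminate on nonempty text).
def pvALoop (p t : List Char) : Nat → List Char → Nat → List Char
  | 0, acc, _ => acc
  | fuel+1, acc, i =>
    if i < t.length then
      if PySem.Chars.lower (PySem.List.slice t (some (i:Int)) (some ((i:Int)+(p.length:Int)))) =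
         PySem.Chars.lower p then
        pvALoop p t fuel
          (acc ++ (if PySem.Chars.isupper (PySem.List.pyGetD t (i:Int) ' ')
                   then ['L','e','s','s','o','n','s'] else ['l','e','s','s','o','n','s']))
          (i + p.length)
      else
        pvALoop p t fuel (acc ++ [PySem.List.pyGetD t (i:Int) ' ']) (i + 1)
    else acc

def replace_pattern (pattern : String) (text : String) : String :=
  String.ofList (pvALoop pattern.toList text.toList (text.toList.length + 1) [] 0)

-- ===== PORT B =====
-- B's `while True` loop: parts/i are the loop state; `let j` is Source B's `j = lt.find(lp, i)`;
-- the fuel bounds the iteration count (one fuel per match; text_length + 1 suffices).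
def pvBLoop (p t lt lp : List Char) : Nat → List (List Char) → Nat → List (List Char)
  | 0, parts, _ => parts
  | fuel+1, parts, i =>
    let j := PySem.Chars.findFrom lt lp (i:Int) none
    if j = -1 then
      parts ++ [PySem.List.slice t (some (i:Int)) none]
    else
      pvBLoop p t lt lp fuel
        (parts ++ [PySem.List.slice t (some (i:Int)) (some j),
                   if PySem.Chars.isupper (PySem.List.pyGetD t j ' ')
                   then ['L','e','s','s','o','n','s'] else ['l','e','s','s','o','n','s']])
        (j.toNat + p.length)

def replace_pattern_alt (pattern : String) (text : String) : String :=
  let lp := PySem.Chars.lower pattern.toList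
  let lt := PySem.Chars.lower text.toList
  String.ofList (PySem.Chars.join []
    (pvBLoop pattern.toList text.toList lt lp (text.toList.length + 1) [] 0))

-- ===== PRECONDITION & SPEC =====
-- Pre_ excludes pattern = "": there Python A loops forever on every nonempty text
-- (i += 0), and its returning "" on ("", "") is an accident of the never-entered loop;
-- B raises IndexError on ("", "").
def Pre_replace_pattern (pattern : String) (text : String) : Prop := pattern.toList ≠ []
instance (pattern : String) (text : String) : Decidable (Pre_replace_pattern pattern text) := by
  unfold Pre_replace_pattern; infer_instance

def pvWitness_replace_pattern : String × String := ("ab", "xABy abz")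

def Spec_replace_pattern (pattern : String) (text : String) (out : String) : Prop := out = replace_pattern_alt pattern text
instance (pattern : String) (text : String) (out : String) : Decidable (Spec_replace_pattern pattern text out) := by unfold Spec_replace_pattern; infer_instance

-- ===== CLAIM (what is proved, stated in full; the proofs are below) =====
def Claim_equal_replace_pattern : Prop := ∀ (pattern : String) (text : String), Dom_replace_pattern pattern text → Pre_replace_pattern pattern text → Spec_replace_pattern pattern text (replace_pattern pattern text)

-- ===== LEMMAS AND PROOFS =====

-- "".join is concatenation
lemma pvJoin_nil_flatten (l : List (List Char)) : PySem.Chars.join [] l = l.flatten := by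
  induction l with
  | nil => simp [PySem.Chars.join_nil]
  | cons p rest ih =>
    cases rest with
    | nil => simp [PySem.Chars.join_singleton]
    | cons q rest' =>
      rw [PySem.Chars.join_cons_cons]
      simp [ih]

-- A's match test at i says: the lowered pattern is a prefix of the lowered text from i
lemma pvMatch_iff (p t : List Char) (i : Nat) :
    (PySem.Chars.lower (PySem.List.slice t (some (i:Int)) (some ((i:Int)+(p.length:Int)))) =
      PySem.Chars.lower p)
    ↔ PySem.Chars.lower p <+: List.drop i (PySem.Chars.lower t) := by
  rw [show ((i:Int)+(p.length:Int)) = (((i + p.length : Nat)) : Int) by push_cast; ring,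
      show ((i + p.length : Nat) : Int) = ((i:Int) + (p.length:Int)) by push_cast; ring,
      PySem.List.slice_natCast_add, List.prefix_iff_eq_take]
  simp only [PySem.Chars.lower, List.length_map, List.map_take, List.map_drop]
  exact eq_comm

lemma pvLower_length (t : List Char) : (PySem.Chars.lower t).length = t.length := by
  simp [PySem.Chars.lower]

lemma pvFindFrom_none (lt lp : List Char) (k : Nat) (hk : k ≤ lt.length)
    (hno : ∀ i, k ≤ i → ¬ lp <+: List.drop i lt) :
    PySem.Chars.findFrom lt lp (k:Int) none = -1 := by
  rw [PySem.Chars.findFrom_natCast_eq_neg_one_iff lt lp k hk]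
  intro hinf
  rcases (PySem.Chars.exists_prefix_drop_iff_isIn lp (List.drop k lt)).2
      ((PySem.Chars.isIn_iff_infix lp (List.drop k lt)).2 hinf) with ⟨d, hd⟩
  rw [List.drop_drop] at hd
  exact hno (k + d) (by omega) hd

lemma pvFindFrom_eq_first (lt lp : List Char) (k j : Nat) (hk : k ≤ lt.length) (hkj : k ≤ j)
    (hpre : lp <+: List.drop j lt)
    (hmin : ∀ i, k ≤ i → i < j → ¬ lp <+: List.drop i lt) :
    PySem.Chars.findFrom lt lp (k:Int) none = (j:Int) := by
  have hne : PySem.Chars.findFrom lt lp (k:Int) none ≠ -1 := by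
    rw [ne_eq, PySem.Chars.findFrom_natCast_eq_neg_one_iff lt lp k hk]
    intro hninf
    apply hninf
    have h1 : lp <:+: List.drop j lt := hpre.isInfix
    have h2 : List.drop j lt <:+: List.drop k lt := by
      rw [show j = k + (j - k) by omega, ← List.drop_drop]
      exact (List.drop_suffix _ _).isInfix
    exact h1.trans h2
  obtain ⟨h1, h2, h3⟩ := PySem.Chars.findFrom_natCast_spec lt lp k hk hne
  set r := PySem.Chars.findFrom lt lp (k:Int) none with hr
  have hr0 : 0 ≤ r := le_trans (by exact_mod_cast Nat.zero_le k) h1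
  have hkr : k ≤ r.toNat := by omega
  rcases Nat.lt_trichotomy r.toNat j with h | h | h
  · exact absurd h2 (hmin r.toNat hkr h)
  · omega
  · exact absurd hpre (h3 j hkj h)

lemma pvA_shift (p t : List Char) (fuel : Nat) (acc : List Char) (i : Nat) :
    pvALoop p t fuel acc i = acc ++ pvALoop p t fuel [] i := by
  induction fuel generalizing acc i with
  | zero => simp [pvALoop]
  | succ f ih =>
    simp only [pvALoop]
    split_ifs with h1 h2 h3
    · rw [ih]
      conv_rhs => rw [ih]
      simp
    · rw [ih]
      conv_rhs => rw [ih]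
      simp
    · rw [ih]
      conv_rhs => rw [ih]
      simp
    · simp

lemma pvB_shift (p t lt lp : List Char) (fuel : Nat) (parts : List (List Char)) (i : Nat) :
    pvBLoop p t lt lp fuel parts i = parts ++ pvBLoop p t lt lp fuel [] i := by
  induction fuel generalizing parts i with
  | zero => simp [pvBLoop]
  | succ f ih =>
    simp only [pvBLoop]
    split_ifs with h1 h2
    · simp
    · rw [ih]
      conv_rhs => rw [ih]
      simp
    · rw [ih]
      conv_rhs => rw [ih]
      simp

lemma pvA_stop (p t : List Char) (fuel : Nat) (acc : List Char) (i : Nat) (h : t.length ≤ i) :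
    pvALoop p t fuel acc i = acc := by
  cases fuel with
  | zero => simp [pvALoop]
  | succ f => simp [pvALoop, Nat.not_lt.2 h]

-- when there is no match exactly at i (i in range), B's output gains text[i] in front
lemma pvB_step (p t : List Char) (i fb : Nat) (hi : i < t.length)
    (hno : ¬ PySem.Chars.lower p <+: List.drop i (PySem.Chars.lower t)) :
    (pvBLoop p t (PySem.Chars.lower t) (PySem.Chars.lower p) (fb+1) [] i).flatten
      = PySem.List.pyGetD t (i:Int) ' '
          :: (pvBLoop p t (PySem.Chars.lower t) (PySem.Chars.lower p) (fb+1) [] (i+1)).flatten := by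
  have hlt : (PySem.Chars.lower t).length = t.length := pvLower_length t
  have hgetD : PySem.List.pyGetD t (i:Int) ' ' = t[i] := by
    simp [PySem.List.pyGetD_natCast, List.getD_eq_getElem?_getD, List.getElem?_eq_getElem hi]
  by_cases hF : PySem.Chars.findFrom (PySem.Chars.lower t) (PySem.Chars.lower p) ((i+1 : Nat) : Int) none = -1
  · have hnone1 : ∀ i', i + 1 ≤ i' → ¬ PySem.Chars.lower p <+: List.drop i' (PySem.Chars.lower t) := by
      intro i' h' hpre
      rw [PySem.Chars.findFrom_natCast_eq_neg_one_iff _ _ (i+1) (by omega)] at hF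
      apply hF
      have h1 : PySem.Chars.lower p <:+: List.drop i' (PySem.Chars.lower t) := hpre.isInfix
      have h2 : List.drop i' (PySem.Chars.lower t) <:+: List.drop (i+1) (PySem.Chars.lower t) := by
        rw [show i' = (i+1) + (i' - (i+1)) by omega, ← List.drop_drop]
        exact (List.drop_suffix _ _).isInfix
      exact h1.trans h2
    have hnone0 : PySem.Chars.findFrom (PySem.Chars.lower t) (PySem.Chars.lower p) ((i : Nat) : Int) none = -1 := by
      apply pvFindFrom_none _ _ i (by omega)
      intro i' h'
      rcases Nat.eq_or_lt_of_le h' with h'' | h''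
      · rw [← h'']; exact hno
      · exact hnone1 i' (by omega)
    simp only [pvBLoop]
    rw [if_pos hnone0, if_pos hF]
    simp only [List.nil_append, List.flatten]
    rw [PySem.List.slice_from_natCast, PySem.List.slice_from_natCast]
    rw [List.drop_eq_getElem_cons hi, hgetD]
    simp
  · obtain ⟨hge, hpreF, hminF⟩ :=
      PySem.Chars.findFrom_natCast_spec (PySem.Chars.lower t) (PySem.Chars.lower p) (i+1) (by omega) hF
    have hF0 : (0:Int) ≤ PySem.Chars.findFrom (PySem.Chars.lower t) (PySem.Chars.lower p) ((i+1 : Nat) : Int) none :=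
      le_trans (by exact_mod_cast Nat.zero_le (i+1)) hge
    obtain ⟨j₀, hj⟩ : ∃ j₀ : Nat,
        PySem.Chars.findFrom (PySem.Chars.lower t) (PySem.Chars.lower p) ((i+1 : Nat) : Int) none = (j₀ : Int) :=
      ⟨_, (Int.toNat_of_nonneg hF0).symm⟩
    rw [hj] at hge hpreF hminF
    simp only [Int.toNat_natCast] at hpreF hminF
    have hgeN : i + 1 ≤ j₀ := by exact_mod_cast hge
    have hfirst : PySem.Chars.findFrom (PySem.Chars.lower t) (PySem.Chars.lower p) ((i : Nat) : Int) none = (j₀ : Int) := by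
      apply pvFindFrom_eq_first _ _ i j₀ (by omega) (by omega) hpreF
      intro i' h1 h2
      rcases Nat.eq_or_lt_of_le h1 with h'' | h''
      · rw [← h'']; exact hno
      · exact hminF i' (by omega) h2
    have hne : ((j₀ : Nat) : Int) ≠ -1 := by omega
    conv_lhs => rw [pvBLoop]
    conv_rhs => rw [pvBLoop]
    simp only [hfirst, hj]
    rw [if_neg hne, if_neg hne]
    conv_rhs => rw [pvB_shift]
    rw [pvB_shift]
    simp only [Int.toNat_natCast, List.nil_append, List.flatten_append, List.flatten]
    rw [PySem.List.slice_natCast, PySem.List.slice_natCast, hgetD]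
    rw [List.drop_eq_getElem_cons hi, show j₀ - i = (j₀ - (i+1)) + 1 from by omega,
        List.take_succ_cons]
    simp

-- with no text left, both loops stop (B: find past the end is -1, the final chunk is empty)
lemma pvEnd (p t : List Char) (hm : p ≠ []) (fa fb i : Nat)
    (hi : t.length ≤ i) (hi2 : i ≤ t.length) :
    (pvBLoop p t (PySem.Chars.lower t) (PySem.Chars.lower p) fb [] i).flatten
      = pvALoop p t fa [] i := by
  rw [pvA_stop p t fa [] i hi]
  cases fb with
  | zero => simp [pvBLoop]
  | succ f =>
    have hlp : PySem.Chars.lower p ≠ [] := by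
      simp [PySem.Chars.lower]; exact hm
    have hnone : PySem.Chars.findFrom (PySem.Chars.lower t) (PySem.Chars.lower p) ((i:Nat):Int) none = -1 := by
      apply pvFindFrom_none _ _ i (by rw [pvLower_length]; omega)
      intro i' h' hpre
      rw [List.drop_eq_nil_of_le (by rw [pvLower_length]; omega)] at hpre
      exact hlp (List.prefix_nil.1 hpre)
    simp only [pvBLoop]
    rw [if_pos hnone]
    simp only [List.nil_append, List.flatten]
    rw [PySem.List.slice_from_natCast, List.drop_eq_nil_of_le hi]
    simp

lemma pvMain (p t : List Char) (hm : p ≠ []) :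
    ∀ k i fa fb, t.length ≤ i + k → i ≤ t.length → t.length < i + fa → t.length < i + fb →
      (pvBLoop p t (PySem.Chars.lower t) (PySem.Chars.lower p) fb [] i).flatten
        = pvALoop p t fa [] i := by
  intro k
  induction k with
  | zero =>
    intro i fa fb h1 h2 h3 h4
    exact pvEnd p t hm fa fb i (by omega) h2
  | succ k ih =>
    intro i fa fb h1 h2 h3 h4
    by_cases hi : i < t.length
    · have hm1 : 1 ≤ p.length := List.length_pos_iff.2 hm
      cases fa with
      | zero => omega
      | succ fa' =>
        by_cases hmatch : PySem.Chars.lower p <+: List.drop i (PySem.Chars.lower t)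
        · -- a match starts exactly at i: both sides emit the word and jump to i + len(pattern)
          cases fb with
          | zero => omega
          | succ fb' =>
            have hlen : p.length ≤ t.length - i := by
              have hl := hmatch.length_le
              simp only [PySem.Chars.lower, List.length_map, List.length_drop] at hl
              exact hl
            have hfirst : PySem.Chars.findFrom (PySem.Chars.lower t) (PySem.Chars.lower p) ((i:Nat):Int) none = ((i:Nat):Int) :=
              pvFindFrom_eq_first _ _ i i (by rw [pvLower_length]; omega) le_rfl hmatch
                (fun i' hle hlt => absurd (lt_of_le_of_lt hle hlt) (lt_irrefl i))
            have hne : ((i:Nat):Int) ≠ -1 := by omega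
            simp only [pvALoop, if_pos hi]
            rw [if_pos ((pvMatch_iff p t i).2 hmatch), pvA_shift]
            simp only [pvBLoop]
            rw [hfirst, if_neg hne, pvB_shift]
            simp only [Int.toNat_natCast, List.nil_append, List.flatten_append, List.flatten,
              PySem.List.slice_natCast, Nat.sub_self, List.take_zero]
            rw [ih (i + p.length) fa' fb' (by omega) (by omega) (by omega) (by omega)]
            simp
        · -- no match at i: both sides copy text[i] and move one step right
          cases fb with
          | zero => omega
          | succ fb' =>
            rw [pvB_step p t i fb' hi hmatch]
            simp only [pvALoop, if_pos hi]
            rw [if_neg (fun h => hmatch ((pvMatch_iff p t i).1 h)), pvA_shift]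
            rw [ih (i + 1) fa' (fb' + 1) (by omega) (by omega) (by omega) (by omega)]
            simp
    · exact pvEnd p t hm fa fb i (by omega) h2

-- ===== VERDICT (by name: the statement is the Claim_ definition above) =====
theorem replace_pattern_spec : Claim_equal_replace_pattern := by
  intro pattern text _ hpre
  unfold Spec_replace_pattern replace_pattern replace_pattern_alt
  simp only []
  have h := pvMain pattern.toList text.toList hpre (text.toList.length) 0
    (text.toList.length + 1) (text.toList.length + 1) (by omega) (by omega) (by omega) (by omega)
  rw [show (have lp := PySem.Chars.lower pattern.toList;
    have lt := PySem.Chars.lower text.toList;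
    String.ofList (PySem.Chars.join [] (pvBLoop pattern.toList text.toList lt lp (text.toList.length + 1) [] 0)))
    = String.ofList (PySem.Chars.join [] (pvBLoop pattern.toList text.toList (PySem.Chars.lower text.toList) (PySem.Chars.lower pattern.toList) (text.toList.length + 1) [] 0)) from rfl]
  rw [pvJoin_nil_flatten, h]
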